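-- pv_equiv track=rewrite | github.com/ansh348/Legal-Knowledge-Graphs | extractor.py | get_node_type_from_id
-- ===== SOURCE A (Python) =====
-- def get_node_type_from_id(node_id: str) -> str:
--     """Infer node type from ID prefix.
--
--     IMPORTANT: Multi-char prefixes (e.g. "js") must be checked BEFORE single-char
--     prefixes (e.g. "j") to avoid false matches. We sort by prefix length descending.
--     """
--     if node_id == "outcome":
--         return "outcome"
--     # Ordered longest-prefix-first to avoid "js1" matching "j" before "js"
--     prefix_map = [
--         ("js", "justification_set"),
--         ("rc", "reasoning_chain"),
--         ("f", "fact"),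
--         ("c", "concept"),
--         ("i", "issue"),
--         ("a", "argument"),
--         ("h", "holding"),
--         ("p", "precedent"),
--     ]
--     for prefix, ntype in prefix_map:
--         if node_id.startswith(prefix):
--             suffix = node_id[len(prefix):]
--             if suffix.isdigit() or (len(suffix) >= 1 and suffix[0] == '_'):
--                 return ntype
--     return "unknown"
-- ===== SOURCE B (Python) =====
-- _PREFIX_TO_TYPE = {
--     "js": "justification_set",
--     "rc": "reasoning_chain",
--     "f": "fact",
--     "c": "concept",
--     "i": "issue",
--     "a": "argument",
--     "h": "holding",
--     "p": "precedent",
-- }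
--
--
-- def get_node_type_from_id(node_id: str) -> str:
--     """Infer node type from ID prefix: one scan to split off the alphabetic
--     prefix, then a single dict lookup (no trial-match loop over prefixes)."""
--     if node_id == "outcome":
--         return "outcome"
--     i = 0
--     while i < len(node_id) and node_id[i].isalpha():
--         i += 1
--     prefix, suffix = node_id[:i], node_id[i:]
--     ntype = _PREFIX_TO_TYPE.get(prefix)
--     if ntype is not None and (suffix.isdigit() or suffix[:1] == "_"):
--         return ntype
--     return "unknown"
-- ===== Notes on version B (the rewrite author's own statement) =====
-- stated objective: idiomatic
-- what changed: Replaces the trial-match loop over eight (prefix, type) pairs by a single scan that splits off the maximal alphabetic prefix followed by one dict lookup and one suffix validation.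
import Mathlib
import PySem

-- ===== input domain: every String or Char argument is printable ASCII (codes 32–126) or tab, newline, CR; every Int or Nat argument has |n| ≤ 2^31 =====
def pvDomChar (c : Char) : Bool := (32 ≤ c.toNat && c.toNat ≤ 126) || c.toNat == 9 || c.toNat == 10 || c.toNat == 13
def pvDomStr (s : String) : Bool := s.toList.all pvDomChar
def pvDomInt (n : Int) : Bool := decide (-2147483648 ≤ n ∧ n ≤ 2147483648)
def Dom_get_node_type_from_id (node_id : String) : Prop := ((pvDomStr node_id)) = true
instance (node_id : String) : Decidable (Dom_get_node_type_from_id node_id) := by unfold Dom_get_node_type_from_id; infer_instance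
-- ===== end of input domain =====

-- B replaces A's trial-match loop over eight prefixes by one scan splitting off the
-- alphabetic prefix plus a single dict lookup (same return value; objective: idiomatic).

-- ===== PORT A =====
-- A's prefix_map literal, in A's order (longest-prefix-first)
def pvPrefixMapA : List (List Char × String) :=
  [(['j','s'], "justification_set"), (['r','c'], "reasoning_chain"),
   (['f'], "fact"), (['c'], "concept"), (['i'], "issue"),
   (['a'], "argument"), (['h'], "holding"), (['p'], "precedent")]

-- A's 'for prefix, ntype in prefix_map' loop, one recursion step per pair
def pvLoopA (cs : List Char) : List (List Char × String) → String
  | [] => "unknown"                                   -- loop falls through: return "unknown"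
  | (pfx, ntype) :: rest =>
      if PySem.Chars.startswith cs pfx then
        let suffix := PySem.List.slice cs (some (PySem.Chars.len pfx)) none
        if PySem.Chars.strIsdigit suffix ||
            (decide (1 ≤ suffix.length) && (PySem.List.pyGet? suffix 0 == some '_')) then
          ntype
        else pvLoopA cs rest
      else pvLoopA cs rest

def get_node_type_from_id (node_id : String) : String :=
  if node_id = "outcome" then "outcome"
  else pvLoopA node_id.toList pvPrefixMapA

-- ===== PORT B =====
-- B's module-level dict _PREFIX_TO_TYPE
def pvPrefixToType : PySem.Dict (List Char) String :=
  PySem.Dict.ofList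
    [(['j','s'], "justification_set"), (['r','c'], "reasoning_chain"),
     (['f'], "fact"), (['c'], "concept"), (['i'], "issue"),
     (['a'], "argument"), (['h'], "holding"), (['p'], "precedent")]

def get_node_type_from_id_alt (node_id : String) : String :=
  if node_id = "outcome" then "outcome"
  else
    let cs := node_id.toList
    -- the index scan 'i = 0; while i < len(node_id) and node_id[i].isalpha(): i += 1'
    -- followed by node_id[:i] / node_id[i:]
    let pre := cs.takeWhile PySem.Chars.isalpha
    let suf := cs.dropWhile PySem.Chars.isalpha
    match PySem.Dict.get? pvPrefixToType pre with
    | some ntype =>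
        if PySem.Chars.strIsdigit suf || (PySem.List.slice suf none (some 1) == ['_']) then ntype
        else "unknown"
    | none => "unknown"

-- ===== PRECONDITION & SPEC =====
def Spec_get_node_type_from_id (node_id : String) (out : String) : Prop := out = get_node_type_from_id_alt node_id
instance (node_id : String) (out : String) : Decidable (Spec_get_node_type_from_id node_id out) := by unfold Spec_get_node_type_from_id; infer_instance

-- ===== CLAIM (what is proved, stated in full; the proofs are below) =====
def Claim_equal_get_node_type_from_id : Prop := ∀ (node_id : String), Dom_get_node_type_from_id node_id → Spec_get_node_type_from_id node_id (get_node_type_from_id node_id)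

-- ===== LEMMAS AND PROOFS =====

-- B's suffix test, as a predicate the lemmas talk about
def pvValid (s : List Char) : Bool :=
  PySem.Chars.strIsdigit s || (PySem.List.slice s none (some 1) == ['_'])

-- A's suffix test equals B's
theorem pvCondA_eq (s : List Char) :
    (PySem.Chars.strIsdigit s ||
      (decide (1 ≤ s.length) && (PySem.List.pyGet? s 0 == some '_'))) = pvValid s := by
  cases s with
  | nil => decide
  | cons c t =>
      rw [pvValid, show ((1:Int)) = ((1:Nat):Int) by norm_num, PySem.List.slice_to_natCast]
      simp [PySem.List.pyGet?, PySem.List.pyIdx?, List.take]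

theorem pvDigit_not_alpha (c : Char) (h : PySem.Chars.isdigit c = true) :
    PySem.Chars.isalpha c = false := by
  simp [PySem.Chars.isdigit, PySem.Chars.isalpha, PySem.Chars.isupper, PySem.Chars.islower,
        Char.le_def, UInt32.le_iff_toNat_le] at *
  omega

-- a valid suffix starts with a non-alphabetic character
theorem pvValid_head (s : List Char) (h : pvValid s = true) :
    ∃ c t, s = c :: t ∧ PySem.Chars.isalpha c = false := by
  cases s with
  | nil => exact absurd h (by decide)
  | cons c t =>
      refine ⟨c, t, rfl, ?_⟩
      rw [pvValid, show ((1:Int)) = ((1:Nat):Int) by norm_num, PySem.List.slice_to_natCast] at h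
      simp [PySem.Chars.strIsdigit, List.take] at h
      rcases h with ⟨hd, _⟩ | hd
      · exact pvDigit_not_alpha c hd
      · subst hd; decide

-- the heart: for an all-alphabetic prefix p, A's (startswith ∧ valid suffix) test
-- holds iff p is exactly the maximal alphabetic prefix and B's suffix test holds
theorem pvKey (cs p : List Char) (ha : ∀ x ∈ p, PySem.Chars.isalpha x = true) :
    (PySem.Chars.startswith cs p = true ∧ pvValid (cs.drop p.length) = true)
    ↔ (cs.takeWhile PySem.Chars.isalpha = p ∧ pvValid (cs.dropWhile PySem.Chars.isalpha) = true) := by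
  constructor
  · rintro ⟨hs, hv⟩
    obtain ⟨s, rfl⟩ := (PySem.Chars.startswith_iff cs p).mp hs
    rw [List.drop_left] at hv
    obtain ⟨c, t, rfl, hc⟩ := pvValid_head _ hv
    rw [List.takeWhile_append_of_pos ha, List.dropWhile_append_of_pos ha,
        List.takeWhile_cons_of_neg (by simp [hc]), List.dropWhile_cons_of_neg (by simp [hc])]
    exact ⟨by simp, hv⟩
  · rintro ⟨hP, hv⟩
    have hcs : cs = p ++ cs.dropWhile PySem.Chars.isalpha := by
      conv_lhs => rw [← List.takeWhile_append_dropWhile (p := PySem.Chars.isalpha) (l := cs)]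
      rw [hP]
    constructor
    · rw [PySem.Chars.startswith_iff]; exact ⟨_, hcs.symm⟩
    · rw [hcs, List.drop_left]; exact hv

-- one step of A's loop, rephrased through pvKey
theorem pvStep (cs p : List Char) (t : String) (rest : List (List Char × String))
    (ha : ∀ x ∈ p, PySem.Chars.isalpha x = true) :
    pvLoopA cs ((p, t) :: rest) =
      if cs.takeWhile PySem.Chars.isalpha = p ∧ pvValid (cs.dropWhile PySem.Chars.isalpha) = true
      then t else pvLoopA cs rest := by
  have hsl : PySem.List.slice cs (some (PySem.Chars.len p)) none = cs.drop p.length := by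
    rw [PySem.Chars.len_eq, PySem.List.slice_from_natCast]
  by_cases hs : PySem.Chars.startswith cs p = true
  · by_cases hv : pvValid (cs.drop p.length) = true
    · have h2 := (pvKey cs p ha).mp ⟨hs, hv⟩
      simp only [pvLoopA, hs, if_true, hsl, pvCondA_eq, hv, h2, and_self, if_true]
    · have h2 : ¬(cs.takeWhile PySem.Chars.isalpha = p ∧
          pvValid (cs.dropWhile PySem.Chars.isalpha) = true) :=
        fun h => hv ((pvKey cs p ha).mpr h).2
      have hvf : pvValid (cs.drop p.length) = false := eq_false_of_ne_true hv
      simp only [pvLoopA, hs, if_true, hsl, pvCondA_eq, hvf, Bool.false_eq_true, if_false, h2]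
  · have h2 : ¬(cs.takeWhile PySem.Chars.isalpha = p ∧
        pvValid (cs.dropWhile PySem.Chars.isalpha) = true) :=
      fun h => hs ((pvKey cs p ha).mpr h).1
    have hsf : PySem.Chars.startswith cs p = false := eq_false_of_ne_true hs
    simp only [pvLoopA, hsf, Bool.false_eq_true, if_false, h2]

-- ===== VERDICT (by name: the statement is the Claim_ definition above) =====
theorem get_node_type_from_id_spec : Claim_equal_get_node_type_from_id := by
  intro node_id _
  unfold Spec_get_node_type_from_id get_node_type_from_id get_node_type_from_id_alt
  by_cases h : node_id = "outcome"
  · simp [h]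
  · simp only [h, if_false]
    rw [pvPrefixMapA]
    rw [pvStep _ ['j','s'] _ _ (by intro x hx; fin_cases hx <;> rfl), pvStep _ ['r','c'] _ _ (by intro x hx; fin_cases hx <;> rfl),
        pvStep _ ['f'] _ _ (by intro x hx; fin_cases hx <;> rfl), pvStep _ ['c'] _ _ (by intro x hx; fin_cases hx <;> rfl),
        pvStep _ ['i'] _ _ (by intro x hx; fin_cases hx <;> rfl), pvStep _ ['a'] _ _ (by intro x hx; fin_cases hx <;> rfl),
        pvStep _ ['h'] _ _ (by intro x hx; fin_cases hx <;> rfl), pvStep _ ['p'] _ _ (by intro x hx; fin_cases hx <;> rfl)]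
    have hvB : ∀ s : List Char,
        (PySem.Chars.strIsdigit s || (PySem.List.slice s none (some 1) == ['_'])) = pvValid s :=
      fun s => rfl
    by_cases hv : pvValid (node_id.toList.dropWhile PySem.Chars.isalpha) = true
    · set P := node_id.toList.takeWhile PySem.Chars.isalpha with hPdef
      by_cases h1 : P = ['j','s']
      · simp [h1, hv, hvB, show PySem.Dict.get? pvPrefixToType ['j','s'] = some "justification_set" from rfl]
      by_cases h2 : P = ['r','c']
      · simp [h2, hv, hvB, show PySem.Dict.get? pvPrefixToType ['r','c'] = some "reasoning_chain" from rfl]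
      by_cases h3 : P = ['f']
      · simp [h3, hv, hvB, show PySem.Dict.get? pvPrefixToType ['f'] = some "fact" from rfl]
      by_cases h4 : P = ['c']
      · simp [h4, hv, hvB, show PySem.Dict.get? pvPrefixToType ['c'] = some "concept" from rfl]
      by_cases h5 : P = ['i']
      · simp [h5, hv, hvB, show PySem.Dict.get? pvPrefixToType ['i'] = some "issue" from rfl]
      by_cases h6 : P = ['a']
      · simp [h6, hv, hvB, show PySem.Dict.get? pvPrefixToType ['a'] = some "argument" from rfl]
      by_cases h7 : P = ['h']
      · simp [h7, hv, hvB, show PySem.Dict.get? pvPrefixToType ['h'] = some "holding" from rfl]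
      by_cases h8 : P = ['p']
      · simp [h8, hv, hvB, show PySem.Dict.get? pvPrefixToType ['p'] = some "precedent" from rfl]
      have hitems : pvPrefixToType.items =
          [(['j','s'], "justification_set"), (['r','c'], "reasoning_chain"),
           (['f'], "fact"), (['c'], "concept"), (['i'], "issue"),
           (['a'], "argument"), (['h'], "holding"), (['p'], "precedent")] := rfl
      have hnone : PySem.Dict.get? pvPrefixToType P = none := by
        rw [PySem.Dict.get?, hitems]
        simp [List.find?_eq_none, beq_iff_eq]
        exact ⟨Ne.symm h1, Ne.symm h2, Ne.symm h3, Ne.symm h4, Ne.symm h5,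
               Ne.symm h6, Ne.symm h7, Ne.symm h8⟩
      simp [h1, h2, h3, h4, h5, h6, h7, h8, pvLoopA, hnone]
    · have hvf : ∀ (p : List Char),
          ¬(node_id.toList.takeWhile PySem.Chars.isalpha = p ∧
            pvValid (node_id.toList.dropWhile PySem.Chars.isalpha) = true) :=
        fun p hh => hv hh.2
      simp only [hvf, if_false]
      cases hget : PySem.Dict.get? pvPrefixToType (node_id.toList.takeWhile PySem.Chars.isalpha) with
      | none => simp [pvLoopA]
      | some t => simp [pvLoopA, hvB, hv]
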